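-- pv_equiv track=rewrite | github.com/liuzhuoling2011/Poincare | pyagent/components/data_factory/business.py | query_exch_by_symbol
-- ===== SOURCE A (Python) =====
-- from string import digits, ascii_letters
--
-- def remove_digits(tstr):
--     rds = str.maketrans('', '', digits)
--     return tstr.translate(rds)
--
-- def query_exch_by_symbol(symbol):
--     product = remove_digits(symbol)
--     if isinstance(product, str):
--         product = product.lower()
--     exch_map = {
--         'SHFE': ['cu', 'ni', 'rb', 'fuefp', 'ag', 'snefp', 'pb', 'au', 'ru', 'alefp', 'hc', 'hcefp', 'auefp', 'al',
--                  'pbefp', 'cuefp', 'sn', 'wrefp', 'wr', 'buefp', 'znefp', 'fu', 'ruefp', 'niefp', 'zn', 'rbefp',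
--                  'agefp', 'bu'],
--         'DCE': ['cs', 'c', 'jd', 'l', 'p', 'a', 'pp', 'm', 'j', 'y', 'bb', 'fb', 'b', 'jm', 'v', 'i'],
--         'CZCE': ['cy', 'zc', 'sm', 'fg', 'rs', 'jr', 'wh', 'sr', 'src', 'ta', 'lr', 'pm', 'sf', 'srp', 'ma', 'ri', 'oi',
--                  'cf', 'rm'],
--         'CFFEX': ['tf', 'ih', 'ic', 't', 'if'],
--     }
--     for key, value in exch_map.items():
--         if product in value:
--             return key
--     raise RuntimeError("symbol %s not found exchange" % symbol)
-- ===== SOURCE B (Python) =====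
-- from string import digits
--
-- _EXCH_BY_PRODUCT = {
--     'cu': 'SHFE',
--     'ni': 'SHFE',
--     'rb': 'SHFE',
--     'fuefp': 'SHFE',
--     'ag': 'SHFE',
--     'snefp': 'SHFE',
--     'pb': 'SHFE',
--     'au': 'SHFE',
--     'ru': 'SHFE',
--     'alefp': 'SHFE',
--     'hc': 'SHFE',
--     'hcefp': 'SHFE',
--     'auefp': 'SHFE',
--     'al': 'SHFE',
--     'pbefp': 'SHFE',
--     'cuefp': 'SHFE',
--     'sn': 'SHFE',
--     'wrefp': 'SHFE',
--     'wr': 'SHFE',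
--     'buefp': 'SHFE',
--     'znefp': 'SHFE',
--     'fu': 'SHFE',
--     'ruefp': 'SHFE',
--     'niefp': 'SHFE',
--     'zn': 'SHFE',
--     'rbefp': 'SHFE',
--     'agefp': 'SHFE',
--     'bu': 'SHFE',
--     'cs': 'DCE',
--     'c': 'DCE',
--     'jd': 'DCE',
--     'l': 'DCE',
--     'p': 'DCE',
--     'a': 'DCE',
--     'pp': 'DCE',
--     'm': 'DCE',
--     'j': 'DCE',
--     'y': 'DCE',
--     'bb': 'DCE',
--     'fb': 'DCE',
--     'b': 'DCE',
--     'jm': 'DCE',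
--     'v': 'DCE',
--     'i': 'DCE',
--     'cy': 'CZCE',
--     'zc': 'CZCE',
--     'sm': 'CZCE',
--     'fg': 'CZCE',
--     'rs': 'CZCE',
--     'jr': 'CZCE',
--     'wh': 'CZCE',
--     'sr': 'CZCE',
--     'src': 'CZCE',
--     'ta': 'CZCE',
--     'lr': 'CZCE',
--     'pm': 'CZCE',
--     'sf': 'CZCE',
--     'srp': 'CZCE',
--     'ma': 'CZCE',
--     'ri': 'CZCE',
--     'oi': 'CZCE',
--     'cf': 'CZCE',
--     'rm': 'CZCE',
--     'tf': 'CFFEX',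
--     'ih': 'CFFEX',
--     'ic': 'CFFEX',
--     't': 'CFFEX',
--     'if': 'CFFEX',
-- }
--
-- def query_exch_by_symbol(symbol):
--     product = symbol.translate(str.maketrans('', '', digits)).lower()
--     try:
--         return _EXCH_BY_PRODUCT[product]
--     except KeyError:
--         raise RuntimeError("symbol %s not found exchange" % symbol)
-- ===== Notes on version B (the rewrite author's own statement) =====
-- stated objective: idiomatic
-- what changed: B inverts the dict-of-lists once into a flat product->exchange dict and answers by a single keyed lookup, replacing A's loop over exchanges with a membership scan of each code list.
import Mathlib
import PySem

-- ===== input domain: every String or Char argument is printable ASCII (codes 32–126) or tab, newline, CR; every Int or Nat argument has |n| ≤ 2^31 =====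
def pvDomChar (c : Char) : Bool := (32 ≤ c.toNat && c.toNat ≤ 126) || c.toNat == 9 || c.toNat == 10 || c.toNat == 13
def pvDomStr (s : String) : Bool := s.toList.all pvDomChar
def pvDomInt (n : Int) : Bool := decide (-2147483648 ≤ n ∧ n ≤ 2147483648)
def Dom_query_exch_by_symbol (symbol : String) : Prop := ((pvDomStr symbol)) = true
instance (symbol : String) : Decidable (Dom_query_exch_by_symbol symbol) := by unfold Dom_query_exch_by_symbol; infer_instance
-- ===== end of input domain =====

-- B replaces A's per-exchange membership scan by one prebuilt flat product→exchange dict (idiomatic single lookup); return-value equivalence on symbols whose product code is known.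

-- ===== PORT A =====
-- str.maketrans('', '', digits) + translate: deletes exactly the characters '0'-'9' (= Char.isDigit); exact
def remove_digits (tstr : String) : String :=
  String.mk (tstr.toList.filter (fun c => !c.isDigit))

def exch_map_A : List (String × List String) := [("SHFE", ["cu", "ni", "rb", "fuefp", "ag", "snefp", "pb", "au", "ru", "alefp", "hc", "hcefp", "auefp", "al", "pbefp", "cuefp", "sn", "wrefp", "wr", "buefp", "znefp", "fu", "ruefp", "niefp", "zn", "rbefp", "agefp", "bu"]), ("DCE", ["cs", "c", "jd", "l", "p", "a", "pp", "m", "j", "y", "bb", "fb", "b", "jm", "v", "i"]), ("CZCE", ["cy", "zc", "sm", "fg", "rs", "jr", "wh", "sr", "src", "ta", "lr", "pm", "sf", "srp", "ma", "ri", "oi", "cf", "rm"]), ("CFFEX", ["tf", "ih", "ic", "t", "if"])]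


-- the for-loop over exch_map.items(): first key whose value list contains product; "" is the (Pre_-excluded) raise path
def scan_exch : List (String × List String) → String → String
  | [], _ => ""
  | (key, value) :: rest, product =>
      if product ∈ value then key else scan_exch rest product

def query_exch_by_symbol (symbol : String) : String :=
  let product := PySem.Str.lower (remove_digits symbol)
  scan_exch exch_map_A product

-- ===== PORT B =====
def exch_by_product : PySem.Dict String String := PySem.Dict.ofList [("cu", "SHFE"), ("ni", "SHFE"), ("rb", "SHFE"), ("fuefp", "SHFE"), ("ag", "SHFE"), ("snefp", "SHFE"), ("pb", "SHFE"), ("au", "SHFE"), ("ru", "SHFE"), ("alefp", "SHFE"), ("hc", "SHFE"), ("hcefp", "SHFE"), ("auefp", "SHFE"), ("al", "SHFE"), ("pbefp", "SHFE"), ("cuefp", "SHFE"), ("sn", "SHFE"), ("wrefp", "SHFE"), ("wr", "SHFE"), ("buefp", "SHFE"), ("znefp", "SHFE"), ("fu", "SHFE"), ("ruefp", "SHFE"), ("niefp", "SHFE"), ("zn", "SHFE"), ("rbefp", "SHFE"), ("agefp", "SHFE"), ("bu", "SHFE"), ("cs", "DCE"), ("c", "DCE"), ("jd", "DCE"), ("l",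 "DCE"), ("p", "DCE"), ("a", "DCE"), ("pp", "DCE"), ("m", "DCE"), ("j", "DCE"), ("y", "DCE"), ("bb", "DCE"), ("fb", "DCE"), ("b", "DCE"), ("jm", "DCE"), ("v", "DCE"), ("i", "DCE"), ("cy", "CZCE"), ("zc", "CZCE"), ("sm", "CZCE"), ("fg", "CZCE"), ("rs", "CZCE"), ("jr", "CZCE"), ("wh", "CZCE"), ("sr", "CZCE"), ("src", "CZCE"), ("ta", "CZCE"), ("lr", "CZCE"), ("pm", "CZCE"), ("sf", "CZCE"), ("srp", "CZCE"), ("ma", "CZCE"), ("ri", "CZCE"), ("oi", "CZCE"), ("cf", "CZCE"), ("rm", "CZCE"), ("tf", "CFFEX"), ("ih", "CFFEX"), ("ic", "CFFEX"), ("t", "CFFEX"), ("if", "CFFEX")]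

def query_exch_by_symbol_alt (symbol : String) : String :=
  let product := PySem.Str.lower (String.mk (symbol.toList.filter (fun c => !c.isDigit)))
  -- try: return _EXCH_BY_PRODUCT[product]; except KeyError: raise — the raise path (none) is excluded by Pre_
  (PySem.Dict.get? exch_by_product product).getD ""

-- ===== PRECONDITION & SPEC =====
-- Pre_ excludes exactly the symbols whose digit-stripped lowercased product code is unknown: there A (and B) raise RuntimeError.
def pv_all_codes : List String := ["cu", "ni", "rb", "fuefp", "ag", "snefp", "pb", "au", "ru", "alefp", "hc", "hcefp", "auefp", "al", "pbefp", "cuefp", "sn", "wrefp", "wr", "buefp", "znefp", "fu", "ruefp", "niefp", "zn", "rbefp", "agefp", "bu", "cs", "c", "jd", "l", "p", "a", "pp", "m", "j", "y", "bb", "fb", "b", "jm", "v", "i", "cy", "zc", "sm", "fg", "rs", "jr", "wh", "sr", "src", "ta", "lr", "pm", "sf", "srp", "ma", "ri", "oi", "cf", "rm", "tf", "ih", "ic", "t", "if"]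

def Pre_query_exch_by_symbol (symbol : String) : Prop :=
  PySem.Str.lower (String.mk (symbol.toList.filter (fun c => !c.isDigit))) ∈ pv_all_codes
instance (symbol : String) : Decidable (Pre_query_exch_by_symbol symbol) := by unfold Pre_query_exch_by_symbol; infer_instance

def pvWitness_query_exch_by_symbol : String := "cu2109"

def Spec_query_exch_by_symbol (symbol : String) (out : String) : Prop := out = query_exch_by_symbol_alt symbol
instance (symbol : String) (out : String) : Decidable (Spec_query_exch_by_symbol symbol out) := by unfold Spec_query_exch_by_symbol; infer_instance

-- ===== CLAIM (what is proved, stated in full; the proofs are below) =====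
def Claim_equal_query_exch_by_symbol : Prop := ∀ (symbol : String), Dom_query_exch_by_symbol symbol → Pre_query_exch_by_symbol symbol → Spec_query_exch_by_symbol symbol (query_exch_by_symbol symbol)

-- ===== LEMMAS AND PROOFS =====
set_option maxHeartbeats 1000000 in
set_option maxRecDepth 10000 in
theorem scan_eq_flat : ∀ p ∈ pv_all_codes,
    scan_exch exch_map_A p = (PySem.Dict.get? exch_by_product p).getD "" := by decide

-- ===== VERDICT (by name: the statement is the Claim_ definition above) =====
theorem query_exch_by_symbol_spec : Claim_equal_query_exch_by_symbol := by
  intro symbol _ hpre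
  unfold Pre_query_exch_by_symbol at hpre
  unfold Spec_query_exch_by_symbol query_exch_by_symbol query_exch_by_symbol_alt
  exact scan_eq_flat _ hpre
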